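-- pv_equiv track=rewrite | github.com/NEU-Nerds/chompy | util3.py | bite
-- ===== SOURCE A (Python) =====
-- def bite(b, pos):
-- 	if pos[1] == 0:
-- 		return b[:pos[0]]
--
-- 	board = b[:]
--
-- 	for row in range(pos[0], len(board)):
-- 		if board[row] > pos[1]:
-- 			board[row] = pos[1];
-- 		else:
-- 			break
--
-- 	# board = [r if r > pos[1] else r for r in b]
--
-- 	return board
-- ===== SOURCE B (Python) =====
-- def bite(b, pos):
-- 	if pos[1] == 0:
-- 		return b[:pos[0]]
-- 	out = []
-- 	mode = 0  # 0: before the bitten column, 1: capping, 2: past the bite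
-- 	for i, v in enumerate(b):
-- 		if mode == 0 and i >= pos[0]:
-- 			mode = 1
-- 		if mode == 1 and v <= pos[1]:
-- 			mode = 2
-- 		out.append(pos[1] if mode == 1 else v)
-- 	return out
-- ===== Notes on version B (the rewrite author's own statement) =====
-- stated objective: alternative
-- what changed: B replaces A's copy-then-mutate index loop with break by a single state-machine pass over enumerate(b) (before-bite / capping / past-bite modes) that appends each output element to a fresh accumulator, never slicing or indexing the board.
-- outside the precondition, e.g. on bite([5, 1, 5], (-1, 3)): A returns [3, 1, 3], B returns [3, 1, 5]; on bite([1], (-5, 2)): A raises IndexError, B returns [1]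
import Mathlib
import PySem

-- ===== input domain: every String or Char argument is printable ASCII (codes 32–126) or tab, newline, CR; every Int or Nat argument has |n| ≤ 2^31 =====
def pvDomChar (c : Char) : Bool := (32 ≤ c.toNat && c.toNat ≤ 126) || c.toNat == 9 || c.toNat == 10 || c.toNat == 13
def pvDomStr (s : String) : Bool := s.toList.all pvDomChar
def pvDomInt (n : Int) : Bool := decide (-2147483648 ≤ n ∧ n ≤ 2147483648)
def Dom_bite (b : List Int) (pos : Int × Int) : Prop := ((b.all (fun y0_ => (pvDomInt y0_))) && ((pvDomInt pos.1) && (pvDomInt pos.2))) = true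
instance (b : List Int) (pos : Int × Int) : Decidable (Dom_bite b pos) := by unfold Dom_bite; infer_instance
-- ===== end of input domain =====

-- B replaces A's copy-then-mutate index loop with break by a single state-machine pass over
-- enumerate(b) appending to a fresh accumulator; same cost, different decomposition.

-- ===== PORT A =====
-- the for-loop over range(pos[0], len(board)) with in-place assignment and break
def biteGo (q : Int) (rows : List Int) (board : List Int) : List Int :=
  match rows with
  | [] => board
  | r :: rs =>
    match PySem.List.pyGet? board r with
    | none => board   -- IndexError (excluded by Pre_bite)
    | some v => if v > q then biteGo q rs (PySem.List.pySetD board r q) else board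

def bite (b : List Int) (pos : Int × Int) : List Int :=
  if pos.2 = 0 then PySem.List.slice b none (some pos.1)
  else biteGo pos.2 (PySem.List.pyRange pos.1 (b.length : Int) 1) b

-- ===== PORT B =====
-- one step of the state machine: update mode from the index, then from the value, then append
def biteStep (p q : Int) (st : Int × List Int) (iv : Int × Int) : Int × List Int :=
  let m1 := if st.1 = 0 ∧ iv.1 ≥ p then 1 else st.1
  let m2 := if m1 = 1 ∧ iv.2 ≤ q then 2 else m1
  (m2, st.2 ++ [if m2 = 1 then q else iv.2])

def bite_alt (b : List Int) (pos : Int × Int) : List Int :=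
  if pos.2 = 0 then PySem.List.slice b none (some pos.1)
  else ((PySem.List.enumerate b 0).foldl (biteStep pos.1 pos.2) (0, [])).2

-- ===== PRECONDITION & SPEC =====
-- Pre_ excludes a negative start row pos[0] when pos[1] ≠ 0: there A raises IndexError when
-- pos[0] < -len(b), and otherwise mutates tail elements through Python's negative-index
-- wraparound — an artefact of the in-place loop that no actual board position reaches.
def Pre_bite (b : List Int) (pos : Int × Int) : Prop := pos.2 ≠ 0 → 0 ≤ pos.1
instance (b : List Int) (pos : Int × Int) : Decidable (Pre_bite b pos) := by
  unfold Pre_bite; infer_instance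

def pvWitness_bite : List Int × (Int × Int) := ([5, 5, 4, 2, 1], (1, 3))

def Spec_bite (b : List Int) (pos : Int × Int) (out : List Int) : Prop := out = bite_alt b pos
instance (b : List Int) (pos : Int × Int) (out : List Int) : Decidable (Spec_bite b pos out) := by
  unfold Spec_bite; infer_instance

-- ===== CLAIM (what is proved, stated in full; the proofs are below) =====
def Claim_equal_bite : Prop := ∀ (b : List Int) (pos : Int × Int),
  Dom_bite b pos → Pre_bite b pos → Spec_bite b pos (bite b pos)

-- ===== LEMMAS AND PROOFS =====

-- common specification: cap the leading rows > q of the tail to q, stop at the first row ≤ q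
def capAll (q : Int) : List Int → List Int
  | [] => []
  | v :: vs => if v ≤ q then v :: vs else q :: capAll q vs

-- A's mutation loop from row n on any board agreeing with b from index n
theorem biteGo_eq (b : List Int) (q : Int) :
    ∀ (m n : Nat) (board : List Int), b.length - n ≤ m →
    board.length = b.length → List.drop n board = List.drop n b →
    biteGo q (PySem.List.pyRange (n : Int) (b.length : Int) 1) board =
      List.take n board ++ capAll q (List.drop n b) := by
  intro m
  induction m with
  | zero =>
      intro n board hm hlen hdrop
      have hn : b.length ≤ n := by omega
      have hrange : PySem.List.pyRange (n : Int) (b.length : Int) 1 = [] :=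
        PySem.List.pyRange_one_eq_nil (by exact_mod_cast hn)
      have hd : List.drop n b = [] := List.drop_eq_nil_of_le hn
      rw [hrange, hd]
      simp only [biteGo, capAll, List.append_nil]
      rw [List.take_of_length_le (by omega)]
  | succ m ih =>
      intro n board hm hlen hdrop
      by_cases hn : n < b.length
      · have hcons : PySem.List.pyRange (n : Int) (b.length : Int) 1 =
            (n : Int) :: PySem.List.pyRange ((n : Int) + 1) (b.length : Int) 1 :=
          PySem.List.pyRange_one_cons (by exact_mod_cast hn)
        rw [hcons]
        have hnb : n < board.length := by omega
        have hget : PySem.List.pyGet? board (n : Int) = some board[n] := by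
          simp [PySem.List.pyGet?_natCast, List.getElem?_eq_getElem hnb]
        have h0 : board[n]? = b[n]? := by
          have := congrArg (fun l => l[0]?) hdrop
          simpa [List.getElem?_drop] using this
        have helem : board[n] = b[n] := by
          rw [List.getElem?_eq_getElem hnb, List.getElem?_eq_getElem hn] at h0
          exact Option.some.inj h0
        have hdropn : List.drop n b = b[n] :: List.drop (n + 1) b :=
          List.drop_eq_getElem_cons hn
        simp only [biteGo, hget]
        by_cases hgt : b[n] > q
        · rw [helem]
          simp only [if_pos hgt]
          have hset : PySem.List.pySetD board (n : Int) q = board.set n q := by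
            simp [PySem.List.pySetD_natCast]
          rw [hset]
          have hcast : (n : Int) + 1 = ((n + 1 : Nat) : Int) := by push_cast; ring
          rw [hcast]
          have hdrop' : List.drop (n + 1) (board.set n q) = List.drop (n + 1) b := by
            have hds : List.drop (n + 1) (board.set n q) = List.drop (n + 1) board := by
              apply List.ext_getElem?
              intro k
              rw [List.getElem?_drop, List.getElem?_drop,
                List.getElem?_set_ne (by omega : n ≠ n + 1 + k)]
            rw [hds, ← List.drop_drop, ← List.drop_drop, hdrop]
          rw [ih (n + 1) (board.set n q) (by omega) (by simp [hlen]) hdrop']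
          have htake : List.take (n + 1) (board.set n q)
              = List.take n board ++ [q] := by
            rw [List.take_set, List.take_add_one, List.getElem?_eq_getElem hnb]
            simp only [Option.toList_some, List.set_append, List.length_take,
              Nat.min_eq_left hnb.le, Nat.lt_irrefl, if_false, Nat.sub_self, List.set_cons_zero]
          rw [htake, hdropn]
          simp [capAll, if_neg (by omega : ¬ b[n] ≤ q)]
        · rw [helem]
          simp only [if_neg hgt]
          rw [hdropn]
          simp only [capAll, if_pos (by omega : b[n] ≤ q)]
          rw [← hdropn, ← hdrop, List.take_append_drop]
      · have hrange : PySem.List.pyRange (n : Int) (b.length : Int) 1 = [] :=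
          PySem.List.pyRange_one_eq_nil (by omega)
        have hd : List.drop n b = [] := List.drop_eq_nil_of_le (by omega)
        rw [hrange, hd]
        simp only [biteGo, capAll, List.append_nil]
        rw [List.take_of_length_le (by omega)]

-- B's fold in mode 2 copies the rest unchanged
theorem fold2 (p q : Int) : ∀ (xs : List Int) (s : Int) (out : List Int),
    ((PySem.List.enumerate xs s).foldl (biteStep p q) (2, out)).2 = out ++ xs := by
  intro xs
  induction xs with
  | nil => intro s out; simp [PySem.List.enumerate_nil]
  | cons x xs ih =>
      intro s out
      rw [PySem.List.enumerate_cons, List.foldl_cons]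
      have hstep : biteStep p q (2, out) (s, x) = (2, out ++ [x]) := by
        simp [biteStep]
      rw [hstep, ih]
      simp

-- B's fold in mode 1 caps until the first row ≤ q
theorem fold1 (p q : Int) : ∀ (xs : List Int) (s : Int) (out : List Int),
    ((PySem.List.enumerate xs s).foldl (biteStep p q) (1, out)).2 = out ++ capAll q xs := by
  intro xs
  induction xs with
  | nil => intro s out; simp [PySem.List.enumerate_nil, capAll]
  | cons x xs ih =>
      intro s out
      rw [PySem.List.enumerate_cons, List.foldl_cons]
      by_cases hle : x ≤ q
      · have hstep : biteStep p q (1, out) (s, x) = (2, out ++ [x]) := by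
          simp [biteStep, hle]
        rw [hstep, fold2, capAll]
        simp [hle]
      · have hstep : biteStep p q (1, out) (s, x) = (1, out ++ [q]) := by
          simp [biteStep, hle]
        rw [hstep, ih, capAll]
        simp [hle]

-- B's fold in mode 0 starting at index s: copy until index p, then capAll
theorem fold0 (p q : Int) : ∀ (xs : List Int) (s : Int) (out : List Int), 0 ≤ p →
    ((PySem.List.enumerate xs s).foldl (biteStep p q) (0, out)).2 =
      out ++ List.take (p - s).toNat xs ++ capAll q (List.drop (p - s).toNat xs) := by
  intro xs
  induction xs with
  | nil => intro s out hp; simp [PySem.List.enumerate_nil, capAll]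
  | cons x xs ih =>
      intro s out hp
      rw [PySem.List.enumerate_cons, List.foldl_cons]
      by_cases hsp : p ≤ s
      · have h0 : (p - s).toNat = 0 := by omega
        rw [h0]
        simp only [List.take_zero, List.drop_zero, List.append_nil]
        by_cases hle : x ≤ q
        · have hstep : biteStep p q (0, out) (s, x) = (2, out ++ [x]) := by
            simp [biteStep, hsp, hle]
          rw [hstep, fold2, capAll]
          simp [hle]
        · have hstep : biteStep p q (0, out) (s, x) = (1, out ++ [q]) := by
            simp [biteStep, hsp, hle]
          rw [hstep, fold1, capAll]
          simp [hle]
      · have hstep : biteStep p q (0, out) (s, x) = (0, out ++ [x]) := by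
          simp [biteStep, hsp]
        rw [hstep, ih (s + 1) (out ++ [x]) hp]
        have hk : (p - s).toNat = (p - (s + 1)).toNat + 1 := by omega
        rw [hk]
        simp [List.take_succ_cons, List.drop_succ_cons]

-- ===== VERDICT (by name: the statement is the Claim_ definition above) =====
theorem bite_spec : Claim_equal_bite := by
  intro b pos _ hpre
  unfold Spec_bite bite bite_alt
  by_cases hq : pos.2 = 0
  · simp [hq]
  · simp only [if_neg hq]
    have hp : 0 ≤ pos.1 := hpre hq
    obtain ⟨n, hn⟩ : ∃ n : Nat, pos.1 = (n : Int) := ⟨pos.1.toNat, by omega⟩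
    rw [hn, biteGo_eq b pos.2 b.length n b (by omega) rfl rfl,
      fold0 ((n : Int)) pos.2 b 0 [] (by omega)]
    simp
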